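-- pv_equiv track=rewrite | github.com/CarlaSa/aoc_2024 | 24.py | swap_instructions
-- ===== SOURCE A (Python) =====
-- from copy import deepcopy
--
-- def swap_instructions(instructions, idx):
--     new_inst = deepcopy(instructions)
--
--     for i in range(len(idx) // 2):
--         idx1 = idx[2 * i]
--         idx2 = idx[2 * i + 1]
--         new_inst[idx1]["output"], new_inst[idx2]["output"] = (new_inst[idx2]["output"],
--                                                               new_inst[idx1]["output"])
--     return new_inst
-- ===== SOURCE B (Python) =====
-- from copy import deepcopy
--
-- def swap_instructions(instructions, idx):
--     new_inst = deepcopy(instructions)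
--     perm = list(range(len(instructions)))
--     for i in range(len(idx) // 2):
--         i1, i2 = idx[2 * i], idx[2 * i + 1]
--         perm[i1], perm[i2] = perm[i2], perm[i1]
--     for j, src in enumerate(perm):
--         if src != j:
--             new_inst[j]["output"] = instructions[src]["output"]
--     return new_inst
-- ===== Notes on version B (the rewrite author's own statement) =====
-- stated objective: alternative
-- what changed: Instead of swapping the 'output' fields of the deep-copied instruction dicts in place pair by pair, B folds the index pairs into a permutation list over positions (perm[j] = the position whose output j must receive) and then rewrites the outputs from the untouched original in one separate pass over enumerate(perm), skipping fixed points; Pre_ additionally excludes association lists with duplicate keys, which no Python dict can represent.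
import Mathlib
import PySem

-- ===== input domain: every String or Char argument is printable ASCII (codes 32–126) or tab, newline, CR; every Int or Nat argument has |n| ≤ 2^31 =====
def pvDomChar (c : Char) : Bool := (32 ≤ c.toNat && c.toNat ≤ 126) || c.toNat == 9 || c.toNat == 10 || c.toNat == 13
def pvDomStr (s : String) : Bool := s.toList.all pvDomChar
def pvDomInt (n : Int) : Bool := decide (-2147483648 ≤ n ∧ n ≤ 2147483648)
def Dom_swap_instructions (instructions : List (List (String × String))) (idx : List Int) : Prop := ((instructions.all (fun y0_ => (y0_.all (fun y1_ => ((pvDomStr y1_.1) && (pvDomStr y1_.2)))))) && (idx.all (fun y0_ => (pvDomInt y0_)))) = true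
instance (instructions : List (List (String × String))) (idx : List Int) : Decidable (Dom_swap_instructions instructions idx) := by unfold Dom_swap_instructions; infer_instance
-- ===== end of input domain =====

-- B replaces A's in-place pairwise output swapping by folding the index pairs into a permutation
-- list over positions and then rewriting outputs from the untouched original in one separate
-- pass over enumerate(perm), skipping fixed points (objective: alternative decomposition, same
-- asymptotic cost). Return-value equivalence only (A deep-copies, so neither program observably
-- mutates its input).

-- ===== PORT A =====
-- d["output"]  (first-match lookup, exact Python dict semantics via PySem.Dict)
def igetOut (d : List (String × String)) : Option String :=
  (PySem.Dict.mk d).get? "output"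

-- d["output"] = v  (overwrite in place keeps position; new key appends)
def isetOut (d : List (String × String)) (v : String) : List (String × String) :=
  ((PySem.Dict.mk d).insert "output" v).items

-- st[i]["output"] = v  (read the dict at python index i, mutate it, write it back;
-- the no-op branch stands for Python's IndexError, excluded by Pre_)
def writeOut (st : List (List (String × String))) (i : Int) (v : String) :
    List (List (String × String)) :=
  match PySem.List.pyGet? st i with
  | some d => PySem.List.pySetD st i (isetOut d v)
  | none => st

-- one iteration of A's loop: read both outputs, then assign crosswise (left to right)
def stepA (idx : List Int) (st : List (List (String × String))) (i : Nat) :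
    List (List (String × String)) :=
  match PySem.List.pyGet? idx ((2 * i : Nat) : Int), PySem.List.pyGet? idx ((2 * i + 1 : Nat) : Int) with
  | some i1, some i2 =>
    match PySem.List.pyGet? st i1, PySem.List.pyGet? st i2 with
    | some d1, some d2 =>
      match igetOut d1, igetOut d2 with
      | some v1, some v2 => writeOut (writeOut st i1 v2) i2 v1
      | _, _ => st
    | _, _ => st
  | _, _ => st

def swap_instructions (instructions : List (List (String × String))) (idx : List Int) :
    List (List (String × String)) :=
  (List.range (idx.length / 2)).foldl (stepA idx) instructions

-- ===== PORT B =====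
-- one iteration of B's pair loop: perm[i1], perm[i2] = perm[i2], perm[i1]
-- (the no-op branches stand for Python's IndexError, excluded by Pre_)
def stepPermL (idx : List Int) (perm : List Int) (i : Nat) : List Int :=
  match PySem.List.pyGet? idx ((2 * i : Nat) : Int), PySem.List.pyGet? idx ((2 * i + 1 : Nat) : Int) with
  | some i1, some i2 =>
    match PySem.List.pyGet? perm i2, PySem.List.pyGet? perm i1 with
    | some v2, some v1 => PySem.List.pySetD (PySem.List.pySetD perm i1 v2) i2 v1
    | _, _ => perm
  | _, _ => perm

-- one iteration of B's rewrite pass over enumerate(perm):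
-- if src != j: new_inst[j]["output"] = instructions[src]["output"]
def stepWrite (instructions : List (List (String × String)))
    (st : List (List (String × String))) (p : Int × Int) :
    List (List (String × String)) :=
  if p.2 = p.1 then st
  else
    match PySem.List.pyGet? instructions p.2 with
    | some d =>
      match igetOut d with
      | some v => writeOut st p.1 v
      | none => st
    | none => st

def swap_instructions_alt (instructions : List (List (String × String))) (idx : List Int) :
    List (List (String × String)) :=
  let perm0 : List Int := PySem.List.pyRange 0 (instructions.length : Int)
  let perm := (List.range (idx.length / 2)).foldl (stepPermL idx) perm0
  (PySem.List.enumerate perm).foldl (stepWrite instructions) instructions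

-- ===== PRECONDITION & SPEC =====
-- position t of idx is a valid python index into instructions whose dict has an "output" key
def okAt (instructions : List (List (String × String))) (idx : List Int) (t : Nat) : Bool :=
  match PySem.List.pyGet? idx (t : Int) with
  | some i =>
    match PySem.List.pyGet? instructions i with
    | some d => (igetOut d).isSome
    | none => false
  | none => false

-- Pre_ excludes (a) association lists with duplicate keys, which represent no Python dict, and
-- (b) exactly the inputs on which the Python A raises Index-/KeyError: some processed index out
-- of range, or the addressed instruction lacking an "output" key.
def Pre_swap_instructions (instructions : List (List (String × String))) (idx : List Int) : Prop :=
  (∀ d ∈ instructions, (d.map Prod.fst).Nodup) ∧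
  ∀ t ∈ List.range (2 * (idx.length / 2)), okAt instructions idx t = true
instance (instructions : List (List (String × String))) (idx : List Int) : Decidable (Pre_swap_instructions instructions idx) := by unfold Pre_swap_instructions; infer_instance

def pvWitness_swap_instructions : (List (List (String × String))) × List Int :=
  ([[("output", "a"), ("x", "q")], [("output", "b")], [("output", "c")]], [0, -1, 1, 0])

def Spec_swap_instructions (instructions : List (List (String × String))) (idx : List Int) (out : List (List (String × String))) : Prop := out = swap_instructions_alt instructions idx
instance (instructions : List (List (String × String))) (idx : List Int) (out : List (List (String × String))) : Decidable (Spec_swap_instructions instructions idx out) := by unfold Spec_swap_instructions; infer_instance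

-- ===== CLAIM (what is proved, stated in full; the proofs are below) =====
def Claim_equal_swap_instructions : Prop := ∀ (instructions : List (List (String × String))) (idx : List Int), Dom_swap_instructions instructions idx → Pre_swap_instructions instructions idx → Spec_swap_instructions instructions idx (swap_instructions instructions idx)

-- ===== LEMMAS AND PROOFS =====

def outv (inst : List (List (String × String))) (s : Int) : String :=
  (igetOut (inst.getD s.toNat [])).getD ""

def HasOut (inst : List (List (String × String))) (k : Nat) : Prop :=
  (igetOut (inst.getD k [])).isSome = true

-- invariant carried through B's pair loop
def GoodL (inst : List (List (String × String))) (perm : List Int) : Prop :=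
  perm.length = inst.length ∧
  ∀ k : Nat, k < perm.length →
    0 ≤ perm.getD k 0 ∧ perm.getD k 0 < (inst.length : Int) ∧
    (perm.getD k 0 ≠ (k : Int) →
      HasOut inst k ∧ HasOut inst (perm.getD k 0).toNat)

theorem igetOut_isetOut (d : List (String × String)) (v : String) :
    igetOut (isetOut d v) = some v := by
  unfold igetOut isetOut
  exact PySem.Dict.get?_insert_self (PySem.Dict.mk d) "output" v

theorem isetOut_isetOut (d : List (String × String)) (v w : String) :
    isetOut (isetOut d v) w = isetOut d w := by
  unfold isetOut
  exact congrArg PySem.Dict.items (PySem.Dict.insert_insert_self (PySem.Dict.mk d) "output" v w)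

-- rewriting the existing "output" value with itself is the identity (needs unique keys)
theorem isetOut_self (d : List (String × String)) (v : String)
    (hnd : (d.map Prod.fst).Nodup) (hv : igetOut d = some v) :
    isetOut d v = d := by
  unfold isetOut
  unfold igetOut at hv
  have hc : (PySem.Dict.mk d).contains "output" = true := by
    rw [PySem.Dict.contains_eq_isSome_get?, hv]; rfl
  rw [PySem.Dict.items_insert_of_contains _ v hc]
  have hitems : (PySem.Dict.mk d).items = d := rfl
  rw [hitems]
  have hmem : ("output", v) ∈ d := by
    have h := PySem.Dict.mem_items_of_get?_eq_some _ hv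
    rwa [hitems] at h
  conv_rhs => rw [← List.map_id d]
  apply List.map_congr_left
  intro p hp
  by_cases hk : p.1 = "output"
  · have hpe : p = ("output", v) := List.inj_on_of_nodup_map hnd hp hmem (by simp [hk])
    simp [hpe]
  · simp [hk]

theorem getD_set_lt {α : Type} (xs : List α) (a : Nat) (x : α) (k : Nat) (d : α)
    (h : a < xs.length) :
    (xs.set a x).getD k d = if k = a then x else xs.getD k d := by
  simp only [List.getD_eq_getElem?_getD, List.getElem?_set]
  split_ifs with h1 h2 h3
  · simp
  · omega
  · omega
  · rfl

theorem pyIdx?_eq_mod (n : Nat) (i : Int) (h1 : -(n : Int) ≤ i) (h2 : i < (n : Int)) :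
    PySem.List.pyIdx? n i = some (PySem.Int.mod i n).toNat := by
  have hn : (0:Int) < (n:Int) := by omega
  rw [PySem.Int.mod_eq_emod_of_pos hn]
  simp only [PySem.List.pyIdx?]
  by_cases hpos : 0 ≤ i
  · rw [if_pos hpos, if_pos h2]
    congr 1
    rw [Int.emod_eq_of_lt hpos h2]
  · rw [if_neg hpos, if_pos h1]
    congr 1
    have h3 : i % (n:Int) = (i + n) % n := by
      conv_rhs => rw [show i + (n:Int) = i + (n:Int) * 1 by ring]
      rw [Int.add_mul_emod_self_left]
    rw [h3, Int.emod_eq_of_lt (by omega) (by omega)]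
    omega

theorem mod_toNat_lt (n : Nat) (i : Int) (hn : 0 < n) :
    (PySem.Int.mod i n).toNat < n := by
  have h1 := PySem.Int.mod_lt i (b := (n:Int)) (by exact_mod_cast hn)
  have h2 := PySem.Int.mod_nonneg i (b := (n:Int)) (by exact_mod_cast hn)
  omega

theorem pyGet?_inrange {α : Type} (xs : List α) (i : Int) (d : α)
    (h1 : -(xs.length : Int) ≤ i) (h2 : i < (xs.length : Int)) :
    PySem.List.pyGet? xs i = some (xs.getD (PySem.Int.mod i xs.length).toNat d) := by
  have hn : 0 < xs.length := by omega
  rw [PySem.List.pyGet?, pyIdx?_eq_mod _ _ h1 h2]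
  have hlt := mod_toNat_lt xs.length i hn
  simp [List.getD_eq_getElem?_getD, List.getElem?_eq_getElem hlt]

theorem pySetD_inrange {α : Type} (xs : List α) (i : Int) (v : α)
    (h1 : -(xs.length : Int) ≤ i) (h2 : i < (xs.length : Int)) :
    PySem.List.pySetD xs i v = xs.set (PySem.Int.mod i xs.length).toNat v := by
  rw [PySem.List.pySetD, PySem.List.pySet?, pyIdx?_eq_mod _ _ h1 h2]
  rfl

theorem length_writeOut (st : List (List (String × String))) (i : Int) (v : String) :
    (writeOut st i v).length = st.length := by
  unfold writeOut
  cases h : PySem.List.pyGet? st i with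
  | none => rfl
  | some d =>
    simp [PySem.List.pySetD, PySem.List.pySet?]
    cases hk : PySem.List.pyIdx? st.length i <;> simp

theorem writeOut_nonneg (st : List (List (String × String))) (j : Int) (v : String)
    (h0 : 0 ≤ j) (h2 : j < (st.length : Int)) :
    writeOut st j v = st.set j.toNat (isetOut (st.getD j.toNat []) v) := by
  have hmod : PySem.Int.mod j st.length = j := by
    rw [PySem.Int.mod_eq_emod_of_pos (by omega), Int.emod_eq_of_lt h0 h2]
  rw [writeOut, pyGet?_inrange st j [] (by omega) h2]
  dsimp only
  rw [pySetD_inrange st j _ (by omega) h2, hmod]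

theorem writeOut_inrange (st : List (List (String × String))) (i : Int) (v : String)
    (h1 : -(st.length : Int) ≤ i) (h2 : i < (st.length : Int)) :
    writeOut st i v =
      st.set (PySem.Int.mod i st.length).toNat
        (isetOut (st.getD (PySem.Int.mod i st.length).toNat []) v) := by
  rw [writeOut, pyGet?_inrange st i [] h1 h2]
  dsimp only
  rw [pySetD_inrange st i _ h1 h2]

theorem length_stepWrite (inst st : List (List (String × String))) (p : Int × Int) :
    (stepWrite inst st p).length = st.length := by
  unfold stepWrite
  by_cases h : p.2 = p.1
  · rw [if_pos h]
  · rw [if_neg h]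
    cases hg : PySem.List.pyGet? inst p.2 with
    | none => rfl
    | some d =>
      dsimp only
      cases ho : igetOut d with
      | none => rfl
      | some v => exact length_writeOut st p.1 v

theorem length_applyW (inst : List (List (String × String))) (l : List (Int × Int)) :
    ∀ st, (l.foldl (stepWrite inst) st).length = st.length := by
  induction l with
  | nil => intro st; rfl
  | cons p rest ih => intro st; rw [List.foldl_cons, ih, length_stepWrite]

-- entry conditions for the rewrite pass starting at absolute position j0
def EntriesOK (inst : List (List (String × String))) (perm : List Int) (j0 : Nat) : Prop :=
  ∀ k : Nat, k < perm.length →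
    0 ≤ perm.getD k 0 ∧ perm.getD k 0 < (inst.length : Int) ∧
    (perm.getD k 0 ≠ ((j0 + k : Nat) : Int) → HasOut inst (perm.getD k 0).toNat)

-- pointwise characterisation of B's rewrite pass
theorem applyW_getD (inst : List (List (String × String))) :
    ∀ (perm : List Int) (j0 : Nat) (st : List (List (String × String))),
      st.length = inst.length → j0 + perm.length ≤ st.length → EntriesOK inst perm j0 →
      ∀ k : Nat, k < st.length →
        ((PySem.List.enumerate perm (j0 : Int)).foldl (stepWrite inst) st).getD k [] =
          if j0 ≤ k ∧ k - j0 < perm.length ∧ perm.getD (k - j0) 0 ≠ (k : Int)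
          then isetOut (st.getD k []) (outv inst (perm.getD (k - j0) 0))
          else st.getD k [] := by
  intro perm
  induction perm with
  | nil =>
    intro j0 st _ _ _ k _
    rw [PySem.List.enumerate_nil, List.foldl_nil,
      if_neg (by rintro ⟨-, h2, -⟩; simp only [List.length_nil] at h2; omega)]
  | cons e rest ih =>
    intro j0 st hlen hbound hok k hk
    have hokh := hok 0 (by simp)
    rw [show (e :: rest).getD 0 0 = e from rfl] at hokh
    simp only [List.length_cons] at hbound
    have hj0lt : j0 < st.length := by omega
    have hst'char : ∀ m : Nat, m < st.length →
        (stepWrite inst st ((j0 : Int), e)).getD m [] =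
          if m = j0 ∧ e ≠ (j0 : Int)
          then isetOut (st.getD j0 []) (outv inst e)
          else st.getD m [] := by
      intro m hm
      unfold stepWrite
      dsimp only
      by_cases he : e = (j0 : Int)
      · rw [if_pos he, if_neg (by tauto)]
      · rw [if_neg he]
        have hout : HasOut inst e.toNat := hokh.2.2 (by simpa using he)
        obtain ⟨w, hw⟩ := Option.isSome_iff_exists.mp hout
        have hmod : PySem.Int.mod e (inst.length : Int) = e := by
          rw [PySem.Int.mod_eq_emod_of_pos (by omega), Int.emod_eq_of_lt hokh.1 hokh.2.1]
        have hread : PySem.List.pyGet? inst e = some (inst.getD e.toNat []) := by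
          rw [pyGet?_inrange inst e [] (by omega) hokh.2.1, hmod]
        rw [hread]
        dsimp only
        rw [hw]
        dsimp only
        rw [writeOut_nonneg st (j0 : Int) w (by omega) (by omega)]
        have hj0n : ((j0 : Int)).toNat = j0 := rfl
        rw [hj0n, getD_set_lt _ _ _ _ _ hj0lt]
        have hov : outv inst e = w := by rw [outv, hw]; rfl
        by_cases hmj : m = j0
        · rw [if_pos hmj, if_pos ⟨hmj, he⟩, hov]
        · rw [if_neg hmj, if_neg (by tauto)]
    have hlen' : (stepWrite inst st ((j0 : Int), e)).length = st.length :=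
      length_stepWrite inst st _
    have hok' : EntriesOK inst rest (j0 + 1) := by
      intro m hm
      have h := hok (m + 1) (by simp only [List.length_cons]; omega)
      rw [List.getD_cons_succ] at h
      refine ⟨h.1, h.2.1, fun hne => h.2.2 ?_⟩
      rwa [show j0 + (m + 1) = j0 + 1 + m from by omega]
    rw [PySem.List.enumerate_cons, List.foldl_cons,
      show ((j0 : Int) + 1) = (((j0 + 1 : Nat)) : Int) from by push_cast; ring,
      ih (j0 + 1) _ (by rw [hlen', hlen]) (by omega) hok' k (by omega)]
    by_cases hkj : k = j0
    · subst hkj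
      rw [if_neg (by rintro ⟨h1, -, -⟩; omega), hst'char k hk]
      have hgd : (e :: rest).getD (k - k) 0 = e := by rw [Nat.sub_self]; rfl
      split_ifs with h1 h2 h2
      · rw [hgd]
      · exact absurd ⟨le_refl k, by simp only [List.length_cons]; omega, by rw [hgd]; exact h1.2⟩ h2
      · exact absurd ⟨rfl, by rw [hgd] at h2; exact h2.2.2⟩ h1
      · rfl
    · have hst'k : (stepWrite inst st ((j0 : Int), e)).getD k [] = st.getD k [] := by
        rw [hst'char k hk, if_neg (fun hc => hkj hc.1)]
      rw [hst'k]
      by_cases hle : j0 < k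
      · have hsub : k - j0 = (k - (j0 + 1)) + 1 := by omega
        rw [hsub, List.getD_cons_succ]
        split_ifs with h1 h2 h2
        · rfl
        · exact absurd ⟨by omega, by simp only [List.length_cons]; omega, h1.2.2⟩ h2
        · have h2l : k - (j0 + 1) < rest.length := by
            have := h2.2.1; simp only [List.length_cons] at this; omega
          exact absurd ⟨by omega, h2l, h2.2.2⟩ h1
        · rfl
      · rw [if_neg (by rintro ⟨h1, -, -⟩; omega), if_neg (by rintro ⟨h1, -, -⟩; omega)]

def applyB (inst : List (List (String × String))) (perm : List Int) :
    List (List (String × String)) :=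
  (PySem.List.enumerate perm).foldl (stepWrite inst) inst

theorem applyB_getD (inst : List (List (String × String))) (perm : List Int)
    (hg : GoodL inst perm) (k : Nat) (hk : k < inst.length) :
    (applyB inst perm).getD k [] =
      if perm.getD k 0 ≠ (k : Int)
      then isetOut (inst.getD k []) (outv inst (perm.getD k 0))
      else inst.getD k [] := by
  obtain ⟨hl, he⟩ := hg
  have hok : EntriesOK inst perm 0 := by
    intro m hm
    obtain ⟨ha, hb, hc⟩ := he m hm
    exact ⟨ha, hb, fun hne => (hc (by simpa using hne)).2⟩
  have h := applyW_getD inst perm 0 inst rfl (by omega) hok k (by omega)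
  simp only [Nat.cast_zero, Nat.sub_zero] at h
  unfold applyB
  rw [h]
  by_cases hc : perm.getD k 0 = (k : Int)
  · rw [if_neg (by rintro ⟨-, -, h3⟩; exact h3 hc), if_neg (fun hx => hx hc)]
  · rw [if_pos ⟨Nat.zero_le k, by omega, hc⟩, if_pos hc]

theorem applyB_iget (inst : List (List (String × String))) (perm : List Int)
    (hg : GoodL inst perm) (k : Nat) (hk : k < inst.length) (hout : HasOut inst k) :
    igetOut ((applyB inst perm).getD k []) = some (outv inst (perm.getD k 0)) := by
  rw [applyB_getD inst perm hg k hk]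
  by_cases hc : perm.getD k 0 = (k : Int)
  · rw [if_neg (fun hx => hx hc), hc]
    obtain ⟨w, hw⟩ := Option.isSome_iff_exists.mp hout
    unfold outv
    rw [show ((k : Int)).toNat = k from Int.toNat_natCast k, hw]
    rfl
  · rw [if_pos hc, igetOut_isetOut]

theorem applyB_iset (inst : List (List (String × String))) (perm : List Int)
    (hg : GoodL inst perm) (k : Nat) (hk : k < inst.length) (v : String) :
    isetOut ((applyB inst perm).getD k []) v = isetOut (inst.getD k []) v := by
  rw [applyB_getD inst perm hg k hk]
  by_cases hc : perm.getD k 0 = (k : Int)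
  · rw [if_neg (fun hx => hx hc)]
  · rw [if_pos hc, isetOut_isetOut]

theorem length_applyB (inst : List (List (String × String))) (perm : List Int) :
    (applyB inst perm).length = inst.length :=
  length_applyW inst _ inst

theorem initPerm_length (n : Nat) : (PySem.List.pyRange 0 (n : Int)).length = n := by
  rw [PySem.List.pyRange_zero_natCast, List.length_map, List.length_range]

theorem initPerm_getD (n k : Nat) (hk : k < n) :
    (PySem.List.pyRange 0 (n : Int)).getD k 0 = (k : Int) := by
  rw [PySem.List.pyRange_zero_natCast, List.getD_eq_getElem?_getD,
    List.getElem?_map, List.getElem?_range hk]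
  rfl

theorem goodL_init (inst : List (List (String × String))) :
    GoodL inst (PySem.List.pyRange 0 (inst.length : Int)) := by
  constructor
  · exact initPerm_length inst.length
  · intro k hk
    rw [initPerm_length] at hk
    rw [initPerm_getD inst.length k hk]
    exact ⟨by omega, by omega, fun hc => absurd rfl hc⟩

theorem applyB_id (inst : List (List (String × String))) :
    applyB inst (PySem.List.pyRange 0 (inst.length : Int)) = inst := by
  apply List.ext_getElem
  · rw [length_applyB]
  · intro k h1 h2
    rw [← List.getD_eq_getElem _ [] h1, ← List.getD_eq_getElem _ [] h2,
      applyB_getD inst _ (goodL_init inst) k h2,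
      initPerm_getD inst.length k h2, if_neg (fun hx => hx rfl)]

theorem okAt_elim (inst : List (List (String × String))) (idx : List Int) (t : Nat)
    (h : okAt inst idx t = true) :
    ∃ iv, PySem.List.pyGet? idx ((t : Nat) : Int) = some iv ∧
      -(inst.length : Int) ≤ iv ∧ iv < (inst.length : Int) ∧
      HasOut inst (PySem.Int.mod iv inst.length).toNat := by
  unfold okAt at h
  cases hiv : PySem.List.pyGet? idx ((t : Nat) : Int) with
  | none => rw [hiv] at h; simp at h
  | some iv =>
    rw [hiv] at h
    dsimp only at h
    cases hd : PySem.List.pyGet? inst iv with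
    | none => rw [hd] at h; simp at h
    | some d =>
      rw [hd] at h
      have hin : PySem.Raise.InRange inst.length iv := by
        by_contra hc
        rw [(PySem.List.pyGet?_eq_none_iff inst iv).mpr hc] at hd
        simp at hd
      obtain ⟨hl, hr⟩ := hin
      refine ⟨iv, rfl, hl, hr, ?_⟩
      rw [pyGet?_inrange inst iv [] hl hr] at hd
      cases hd
      exact h

theorem crux (inst : List (List (String × String))) (idx : List Int)
    (perm : List Int) (i : Nat)
    (hnd : ∀ d ∈ inst, (d.map Prod.fst).Nodup)
    (hg : GoodL inst perm)
    (h1 : okAt inst idx (2 * i) = true) (h2 : okAt inst idx (2 * i + 1) = true) :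
    stepA idx (applyB inst perm) i = applyB inst (stepPermL idx perm i) ∧
    GoodL inst (stepPermL idx perm i) := by
  obtain ⟨i1, hiv1, hl1, hr1, hout1⟩ := okAt_elim inst idx (2 * i) h1
  obtain ⟨i2, hiv2, hl2, hr2, hout2⟩ := okAt_elim inst idx (2 * i + 1) h2
  have hn : 0 < inst.length := by omega
  have hnI : (0 : Int) < (inst.length : Int) := by exact_mod_cast hn
  obtain ⟨hpl, hpe⟩ := hg
  have hplI : ((perm.length : Nat) : Int) = ((inst.length : Nat) : Int) := by exact_mod_cast hpl
  set j1 : Int := PySem.Int.mod i1 (inst.length : Int) with hj1def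
  set j2 : Int := PySem.Int.mod i2 (inst.length : Int) with hj2def
  have hj10 : 0 ≤ j1 := PySem.Int.mod_nonneg i1 hnI
  have hj11 : j1 < (inst.length : Int) := PySem.Int.mod_lt i1 hnI
  have hj20 : 0 ≤ j2 := PySem.Int.mod_nonneg i2 hnI
  have hj21 : j2 < (inst.length : Int) := PySem.Int.mod_lt i2 hnI
  have hj1lt : j1.toNat < inst.length := by omega
  have hj2lt : j2.toNat < inst.length := by omega
  have hj1c : ((j1.toNat : Nat) : Int) = j1 := by omega
  have hj2c : ((j2.toNat : Nat) : Int) = j2 := by omega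
  set b1 : Int := perm.getD j1.toNat 0 with hb1def
  set b2 : Int := perm.getD j2.toNat 0 with hb2def
  have hpe1 := hpe j1.toNat (by omega)
  have hpe2 := hpe j2.toNat (by omega)
  rw [hj1c] at hpe1
  rw [hj2c] at hpe2
  -- source positions and their output keys
  have hsrc1 : 0 ≤ b1 ∧ b1 < (inst.length : Int) ∧ HasOut inst b1.toNat := by
    refine ⟨hpe1.1, hpe1.2.1, ?_⟩
    by_cases hb : b1 = j1
    · rw [hb]; exact hout1
    · exact (hpe1.2.2 hb).2
  have hsrc2 : 0 ≤ b2 ∧ b2 < (inst.length : Int) ∧ HasOut inst b2.toNat := by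
    refine ⟨hpe2.1, hpe2.2.1, ?_⟩
    by_cases hb : b2 = j2
    · rw [hb]; exact hout2
    · exact (hpe2.2.2 hb).2
  -- B's pair step is two list writes on perm
  set perm' : List Int := (perm.set j1.toNat b2).set j2.toNat b1 with hperm'def
  have hmodp1 : PySem.Int.mod i1 ((perm.length : Nat) : Int) = j1 := by rw [hplI]
  have hmodp2 : PySem.Int.mod i2 ((perm.length : Nat) : Int) = j2 := by rw [hplI]
  have hsp : stepPermL idx perm i = perm' := by
    unfold stepPermL
    rw [hiv1, hiv2]
    dsimp only
    rw [pyGet?_inrange perm i2 0 (by rw [hplI]; omega) (by rw [hplI]; omega), hmodp2,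
      pyGet?_inrange perm i1 0 (by rw [hplI]; omega) (by rw [hplI]; omega), hmodp1]
    dsimp only
    rw [pySetD_inrange perm i1 b2 (by rw [hplI]; omega) (by rw [hplI]; omega), hmodp1]
    have hlenset : ((perm.set j1.toNat b2).length : Int) = ((perm.length : Nat) : Int) := by
      rw [List.length_set]
    rw [pySetD_inrange _ i2 b1 (by rw [hlenset, hplI]; omega) (by rw [hlenset, hplI]; omega)]
    rw [show PySem.Int.mod i2 (((perm.set j1.toNat b2).length : Nat) : Int) = j2 from by
      rw [hlenset, hplI]]
  have hperm'len : perm'.length = inst.length := by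
    rw [hperm'def, List.length_set, List.length_set, hpl]
  have hperm'getD : ∀ k : Nat, k < inst.length →
      perm'.getD k 0 =
        if k = j2.toNat then b1 else if k = j1.toNat then b2 else perm.getD k 0 := by
    intro k hk
    rw [hperm'def, getD_set_lt _ _ _ _ _ (by rw [List.length_set]; omega),
      getD_set_lt _ _ _ _ _ (by omega)]
  have hg' : GoodL inst perm' := by
    refine ⟨hperm'len, ?_⟩
    intro k hk
    rw [hperm'len] at hk
    rw [hperm'getD k hk]
    by_cases hk2 : k = j2.toNat
    · rw [if_pos hk2]
      refine ⟨hsrc1.1, hsrc1.2.1, fun hne => ?_⟩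
      refine ⟨by rw [hk2]; exact hout2, hsrc1.2.2⟩
    · rw [if_neg hk2]
      by_cases hk1 : k = j1.toNat
      · rw [if_pos hk1]
        refine ⟨hsrc2.1, hsrc2.2.1, fun hne => ?_⟩
        refine ⟨by rw [hk1]; exact hout1, hsrc2.2.2⟩
      · rw [if_neg hk1]
        exact hpe k (by omega)
  refine ⟨?_, hsp ▸ hg'⟩
  rw [hsp]
  -- A's step on the applied state
  set st : List (List (String × String)) := applyB inst perm with hstdef
  have hstlen : st.length = inst.length := length_applyB inst perm
  have hstlenI : ((st.length : Nat) : Int) = ((inst.length : Nat) : Int) := by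
    exact_mod_cast hstlen
  set v1 : String := outv inst b1 with hv1def
  set v2 : String := outv inst b2 with hv2def
  have hread1 : PySem.List.pyGet? st i1 = some (st.getD j1.toNat []) := by
    rw [pyGet?_inrange st i1 [] (by rw [hstlenI]; omega) (by rw [hstlenI]; omega),
      show PySem.Int.mod i1 ((st.length : Nat) : Int) = j1 from by rw [hstlenI]]
  have hread2 : PySem.List.pyGet? st i2 = some (st.getD j2.toNat []) := by
    rw [pyGet?_inrange st i2 [] (by rw [hstlenI]; omega) (by rw [hstlenI]; omega),
      show PySem.Int.mod i2 ((st.length : Nat) : Int) = j2 from by rw [hstlenI]]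
  have higet1 : igetOut (st.getD j1.toNat []) = some v1 := by
    rw [hstdef, applyB_iget inst perm ⟨hpl, hpe⟩ j1.toNat hj1lt hout1]
  have higet2 : igetOut (st.getD j2.toNat []) = some v2 := by
    rw [hstdef, applyB_iget inst perm ⟨hpl, hpe⟩ j2.toNat hj2lt hout2]
  unfold stepA
  rw [hiv1, hiv2]
  dsimp only
  rw [hread1, hread2]
  dsimp only
  rw [higet1, higet2]
  dsimp only
  rw [writeOut_inrange st i1 v2 (by rw [hstlenI]; omega) (by rw [hstlenI]; omega),
    show PySem.Int.mod i1 ((st.length : Nat) : Int) = j1 from by rw [hstlenI]]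
  set x1 : List (String × String) := isetOut (st.getD j1.toNat []) v2 with hx1def
  set st1 : List (List (String × String)) := st.set j1.toNat x1 with hst1def
  have hst1len : st1.length = inst.length := by rw [hst1def, List.length_set, hstlen]
  have hst1lenI : ((st1.length : Nat) : Int) = ((inst.length : Nat) : Int) := by
    exact_mod_cast hst1len
  rw [writeOut_inrange st1 i2 v1 (by rw [hst1lenI]; omega) (by rw [hst1lenI]; omega),
    show PySem.Int.mod i2 ((st1.length : Nat) : Int) = j2 from by rw [hst1lenI]]
  set x2 : List (String × String) := isetOut (st1.getD j2.toNat []) v1 with hx2def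
  have hx2' : x2 = isetOut (inst.getD j2.toNat []) v1 := by
    rw [hx2def, hst1def]
    by_cases hjj : j2.toNat = j1.toNat
    · rw [getD_set_lt _ _ _ _ _ (by omega), if_pos hjj, hx1def, isetOut_isetOut, hjj,
        hstdef, applyB_iset inst perm ⟨hpl, hpe⟩ j1.toNat hj1lt v1]
    · rw [getD_set_lt _ _ _ _ _ (by omega), if_neg hjj,
        hstdef, applyB_iset inst perm ⟨hpl, hpe⟩ j2.toNat hj2lt v1]
  have hx1' : x1 = isetOut (inst.getD j1.toNat []) v2 := by
    rw [hx1def, hstdef, applyB_iset inst perm ⟨hpl, hpe⟩ j1.toNat hj1lt v2]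
  -- identity rewrites are no-ops on the original dicts
  have hndk : ∀ k : Nat, k < inst.length → ((inst.getD k []).map Prod.fst).Nodup := by
    intro k hk
    rw [List.getD_eq_getElem _ [] (by omega)]
    exact hnd _ (List.getElem_mem _)
  have hself : ∀ k : Nat, k < inst.length → HasOut inst k →
      isetOut (inst.getD k []) (outv inst ((k : Nat) : Int)) = inst.getD k [] := by
    intro k hk hout
    obtain ⟨w, hw⟩ := Option.isSome_iff_exists.mp hout
    have hov : outv inst ((k : Nat) : Int) = w := by
      unfold outv
      rw [Int.toNat_natCast, hw]
      rfl
    rw [hov]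
    exact isetOut_self _ w (hndk k hk) hw
  -- pointwise comparison
  apply List.ext_getElem
  · rw [List.length_set, hst1len, length_applyB]
  · intro k hkL hkR
    have hk : k < inst.length := by
      rw [List.length_set, hst1len] at hkL
      exact hkL
    rw [← List.getD_eq_getElem _ [] hkL, ← List.getD_eq_getElem _ [] hkR,
      applyB_getD inst perm' hg' k hk, hperm'getD k hk,
      getD_set_lt _ _ _ _ _ (by rw [hst1len]; omega)]
    by_cases hk2 : k = j2.toNat
    · rw [if_pos hk2, if_pos hk2, hx2']
      by_cases hb : b1 = ((k : Nat) : Int)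
      · rw [if_neg (fun hx => hx hb), hk2] at *
        rw [show v1 = outv inst ((j2.toNat : Nat) : Int) from by rw [hv1def, hb, hk2]]
        exact hself j2.toNat (by omega) hout2
      · rw [if_pos hb, hk2]
    · rw [if_neg hk2, if_neg hk2, hst1def,
        getD_set_lt _ _ _ _ _ (by rw [hstlen]; omega)]
      by_cases hk1 : k = j1.toNat
      · rw [if_pos hk1, if_pos hk1, hx1']
        by_cases hb : b2 = ((k : Nat) : Int)
        · rw [if_neg (fun hx => hx hb)]
          rw [show v2 = outv inst ((j1.toNat : Nat) : Int) from by rw [hv2def, hb, hk1]]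
          rw [hk1]
          exact hself j1.toNat (by omega) hout1
        · rw [if_pos hb, hk1]
      · rw [if_neg hk1, if_neg hk1, hstdef,
          applyB_getD inst perm ⟨hpl, hpe⟩ k hk]

theorem main_fold (inst : List (List (String × String))) (idx : List Int)
    (hnd : ∀ d ∈ inst, (d.map Prod.fst).Nodup) :
    ∀ (is : List Nat) (perm : List Int), GoodL inst perm →
      (∀ i ∈ is, okAt inst idx (2 * i) = true ∧ okAt inst idx (2 * i + 1) = true) →
      is.foldl (stepA idx) (applyB inst perm) =
        applyB inst (is.foldl (stepPermL idx) perm) := by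
  intro is
  induction is with
  | nil => intro perm _ _; rfl
  | cons i rest ih =>
    intro perm hgp hok
    have hi := hok i List.mem_cons_self
    have hc := crux inst idx perm i hnd hgp hi.1 hi.2
    rw [List.foldl_cons, hc.1, List.foldl_cons]
    exact ih _ hc.2 (fun t ht => hok t (List.mem_cons_of_mem _ ht))

-- ===== VERDICT (by name: the statement is the Claim_ definition above) =====
theorem swap_instructions_spec : Claim_equal_swap_instructions := by
  intro inst idx _ hpre
  obtain ⟨hnd, hpre⟩ := hpre
  unfold Spec_swap_instructions swap_instructions swap_instructions_alt
  have hok : ∀ i ∈ List.range (idx.length / 2),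
      okAt inst idx (2 * i) = true ∧ okAt inst idx (2 * i + 1) = true := by
    intro i hi
    rw [List.mem_range] at hi
    exact ⟨hpre _ (List.mem_range.mpr (by omega)), hpre _ (List.mem_range.mpr (by omega))⟩
  have := main_fold inst idx hnd (List.range (idx.length / 2))
    (PySem.List.pyRange 0 (inst.length : Int)) (goodL_init inst) hok
  rw [applyB_id] at this
  exact this
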